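-- pv_equiv track=rewrite | github.com/medAndro/Algorithm-Solved | 프로그래머스/1/72410. 신규 아이디 추천/신규 아이디 추천.py | solution
-- ===== SOURCE A (Python) =====
-- def solution(new_id):
--     lower_id = list(new_id.lower())
--     new_id = []
--     for char in lower_id:
--         if not (char.isdigit() or char.isalpha() or char in "-_."):
--             continue
--         if (not new_id) or (not (new_id[-1] == '.' and char == '.')):
--             new_id.append(char)
--
--     if new_id and new_id[-1] == '.':
--         new_id = new_id[:-1]
--     if new_id and new_id[0] == '.':
--         new_id = new_id[1:]
--     if not new_id:
--         new_id.append('a')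
--     new_id = new_id[:15]
--     if new_id and new_id[-1] == '.':
--         new_id = new_id[:-1]
--
--     while len(new_id) <= 2:
--         new_id.append(new_id[-1])
--     return ''.join(new_id)
-- ===== SOURCE B (Python) =====
-- def solution(new_id):
--     kept = ''.join(c for c in new_id.lower() if c.isalnum() or c in "-_.")
--     core = '.'.join(w for w in kept.split('.') if w) or 'a'
--     head = '.'.join(w for w in core[:15].split('.') if w)
--     return head.ljust(3, head[-1])
-- ===== Notes on version B (the rewrite author's own statement) =====
-- stated objective: idiomatic
-- what changed: A's stateful per-character scan (append while inspecting the last appended char to collapse dots, then list surgery to strip edge dots and re-strip after slicing) is replaced by token processing: split on the dot separator and rejoin the nonempty tokens, which collapses and strips dots in one stroke, done once before and once after the 15-char slice, with str.ljust for the padding.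
import Mathlib
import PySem

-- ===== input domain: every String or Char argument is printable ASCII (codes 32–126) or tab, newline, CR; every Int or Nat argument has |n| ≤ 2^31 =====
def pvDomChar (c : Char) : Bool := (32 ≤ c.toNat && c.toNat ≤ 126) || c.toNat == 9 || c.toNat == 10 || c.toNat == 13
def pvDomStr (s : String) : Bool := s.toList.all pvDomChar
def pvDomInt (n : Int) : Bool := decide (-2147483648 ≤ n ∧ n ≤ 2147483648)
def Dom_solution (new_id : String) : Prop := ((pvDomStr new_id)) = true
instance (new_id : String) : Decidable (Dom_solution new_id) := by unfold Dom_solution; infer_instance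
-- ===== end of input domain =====

-- B replaces A's stateful collapsing scan and its list surgery by token processing:
-- split on '.', rejoin the nonempty tokens with '.' (before and after the 15-char slice); objective: idiomatic.

-- ===== PORT A =====
-- A's per-character loop body: skip disallowed chars, append unless it would duplicate a '.'
def aStep (acc : List Char) (c : Char) : List Char :=
  if ¬ (PySem.Chars.isdigit c || PySem.Chars.isalpha c || "-_.".toList.contains c) then acc
  else if acc = [] ∨ ¬ (PySem.List.pyGet? acc (-1) = some '.' ∧ c = '.') then acc ++ [c]
  else acc

-- A's final loop 'while len(new_id) <= 2: new_id.append(new_id[-1])'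
-- (the default 'a' of pyGetD is never read: the list is nonempty at every call site)
def aPad (nid : List Char) : List Char :=
  if nid.length ≤ 2 then aPad (nid ++ [PySem.List.pyGetD nid (-1) 'a']) else nid
termination_by 3 - nid.length
decreasing_by simp; omega

def solution (new_id : String) : String :=
  let lower_id := PySem.Chars.lower new_id.toList
  let nid := lower_id.foldl aStep []
  let nid := if nid ≠ [] ∧ PySem.List.pyGet? nid (-1) = some '.' then PySem.List.slice nid none (some (-1)) else nid
  let nid := if nid ≠ [] ∧ PySem.List.pyGet? nid 0 = some '.' then PySem.List.slice nid (some 1) none else nid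
  let nid := if nid = [] then nid ++ ['a'] else nid
  let nid := PySem.List.slice nid none (some 15)
  let nid := if nid ≠ [] ∧ PySem.List.pyGet? nid (-1) = some '.' then PySem.List.slice nid none (some (-1)) else nid
  String.ofList (aPad nid)

-- ===== PORT B =====
def solution_alt (new_id : String) : String :=
  let kept := (PySem.Chars.lower new_id.toList).filter
      (fun c => PySem.Chars.isalnum c || "-_.".toList.contains c)
  -- '.'.join(w for w in kept.split('.') if w) or 'a'
  let core0 := PySem.Chars.join ['.'] ((PySem.Chars.splitOn kept ['.']).filter (· ≠ []))
  let core := if core0 = [] then ['a'] else core0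
  -- '.'.join(w for w in core[:15].split('.') if w)
  let head := PySem.Chars.join ['.']
      ((PySem.Chars.splitOn (PySem.Chars.slice core none (some 15)) ['.']).filter (· ≠ []))
  -- head.ljust(3, head[-1]) ported by hand (exact: right-pad with the last char to width 3;
  -- the pyGetD default 'a' is never read, head is nonempty)
  String.ofList (head ++ List.replicate (3 - head.length) (PySem.List.pyGetD head (-1) 'a'))

-- ===== PRECONDITION & SPEC =====
def Spec_solution (new_id : String) (out : String) : Prop := out = solution_alt new_id
instance (new_id : String) (out : String) : Decidable (Spec_solution new_id out) := by unfold Spec_solution; infer_instance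

-- ===== CLAIM (what is proved, stated in full; the proofs are below) =====
def Claim_equal_solution : Prop := ∀ (new_id : String), Dom_solution new_id → Spec_solution new_id (solution new_id)

-- ===== LEMMAS AND PROOFS =====

def keepA (c : Char) : Bool :=
  PySem.Chars.isdigit c || PySem.Chars.isalpha c || "-_.".toList.contains c

-- collapse consecutive dots; the flag says whether the previous character was a dot
def dcoll : Bool → List Char → List Char
  | _, [] => []
  | d, c :: t => if d && (c == '.') then dcoll (c == '.') t else c :: dcoll (c == '.') t

-- A's loop as a recursion: filter and collapse in one pass
def gA : Bool → List Char → List Char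
  | _, [] => []
  | d, c :: t =>
    if keepA c then (if d && (c == '.') then gA d t else c :: gA (c == '.') t) else gA d t

def PnoDD (a b : Char) : Prop := ¬ (a = '.' ∧ b = '.')
def tailDot (m : List Char) : List Char := if m.head? = some '.' then m.tail else m
def dropDot (m : List Char) : List Char := if m.getLast? = some '.' then m.dropLast else m

-- the stripped collapsed form both programs reach before the slice/pad stage
def canon (l : List Char) : List Char := dropDot (tailDot (dcoll false l))

-- what B's join-of-split contributes after the head token of l
def bSeg : List Char → List Char
  | [] => []
  | c :: t => if c = '.' then (if canon t = [] then [] else '.' :: canon t) else c :: bSeg t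

-- Python's split('.') as a plain recursion
def S : List Char → List (List Char)
  | [] => [[]]
  | c :: t => if c = '.' then [] :: S t else (S t).modifyHead (c :: ·)

theorem pyGet?_neg_one (l : List Char) : PySem.List.pyGet? l (-1) = l.getLast? := by
  cases l with
  | nil => rfl
  | cons a t =>
    simp [PySem.List.pyGet?, PySem.List.pyIdx?]
    rw [List.getLast?_eq_getElem?]
    simp

theorem pyGet?_zero (l : List Char) : PySem.List.pyGet? l 0 = l.head? := by
  cases l <;> simp [PySem.List.pyGet?, PySem.List.pyIdx?]

theorem slice_fifteen (u : List Char) : PySem.List.slice u none (some 15) = u.take 15 := by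
  simp [PySem.List.slice, PySem.List.clampIdx]

theorem slice_neg_one (u : List Char) : PySem.List.slice u none (some (-1)) = u.dropLast := by
  simp [PySem.List.slice, PySem.List.clampIdx, List.dropLast_eq_take]
  split <;> rename_i h
  · simp_all
  · omega

theorem slice_one (u : List Char) : PySem.List.slice u (some 1) none = u.tail := by
  simp [PySem.List.slice, PySem.List.clampIdx]
  cases u with
  | nil => rfl
  | cons a t => simp

theorem aStep_eq (acc : List Char) (c : Char) :
    aStep acc c = if keepA c then
        (if acc.getLast? = some '.' ∧ c = '.' then acc else acc ++ [c]) else acc := by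
  simp only [aStep, keepA, pyGet?_neg_one]
  by_cases hk : (PySem.Chars.isdigit c || PySem.Chars.isalpha c || "-_.".toList.contains c) = true
  · rw [if_neg (not_not_intro hk), if_pos hk]
    by_cases hd : acc.getLast? = some '.' ∧ c = '.'
    · have hacc : acc ≠ [] := by intro h; rw [h] at hd; simp at hd
      rw [if_pos hd, if_neg]
      intro h
      rcases h with h | h
      · exact hacc h
      · exact h hd
    · rw [if_neg hd, if_pos (Or.inr hd)]
  · rw [if_pos (by simpa using hk), if_neg hk]

theorem foldl_aStep (l : List Char) (acc : List Char) :
    l.foldl aStep acc = acc ++ gA (acc.getLast? == some '.') l := by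
  induction l generalizing acc with
  | nil => simp [gA]
  | cons c t ih =>
    rw [List.foldl_cons, ih, aStep_eq, gA]
    by_cases hk : keepA c = true
    · rw [if_pos hk, if_pos hk]
      by_cases hd : acc.getLast? = some '.' ∧ c = '.'
      · rw [if_pos hd, if_pos (by simp [hd.1, hd.2])]
      · rw [if_neg hd, if_neg (by simpa using hd)]
        have hconc : ∀ (acc : List Char), (acc ++ [c]).getLast? = some c := by
          intro acc; simp
        cases acc with
        | nil => simp
        | cons x xs =>
          rw [show (x :: xs ++ [c]) = (x :: xs) ++ [c] by simp, hconc]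
          simp
    · rw [if_neg hk, if_neg hk]

theorem gA_eq_dcoll (l : List Char) (d : Bool) : gA d l = dcoll d (l.filter keepA) := by
  induction l generalizing d with
  | nil => simp [gA, dcoll]
  | cons c t ih =>
    rw [gA]
    by_cases hk : keepA c = true
    · rw [if_pos hk, List.filter_cons_of_pos hk, dcoll]
      by_cases hd : (d && (c == '.')) = true
      · rw [if_pos hd, if_pos hd, ih]
        simp only [Bool.and_eq_true, beq_iff_eq] at hd
        rw [hd.1]
        simp [hd.2]
      · rw [if_neg hd, if_neg hd, ih]
    · rw [if_neg hk, List.filter_cons_of_neg hk, ih]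

theorem keep_eq :
    (fun c => PySem.Chars.isalnum c || "-_.".toList.contains c) = keepA := by
  funext c
  simp only [PySem.Chars.isalnum, keepA]
  cases PySem.Chars.isdigit c <;> cases PySem.Chars.isalpha c <;> simp

theorem dcoll_spec (l : List Char) (d : Bool) :
    (d = true → (dcoll d l).head? ≠ some '.') ∧ (dcoll d l).IsChain PnoDD := by
  induction l generalizing d with
  | nil => simp [dcoll]
  | cons c t ih =>
    rw [dcoll]
    by_cases hd : (d && (c == '.')) = true
    · rw [if_pos hd]
      simp only [Bool.and_eq_true, beq_iff_eq] at hd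
      have h2 : (c == '.') = true := by simp [hd.2]
      rw [h2, hd.1]
      exact ih true
    · rw [if_neg hd]
      refine ⟨?_, ?_⟩
      · intro hdt
        simp only [hdt, Bool.true_and] at hd
        simp only [List.head?_cons, ne_eq, Option.some.injEq]
        intro h
        exact hd (by simp [h])
      · rcases ih (c == '.') with ⟨ih1, ih2⟩
        cases hh : (dcoll (c == '.') t) with
        | nil => simp
        | cons y ys =>
          rw [List.isChain_cons]
          refine ⟨?_, by rw [← hh]; exact ih2⟩
          intro z hz
          simp only [List.head?_cons, Option.mem_def, Option.some.injEq] at hz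
          subst hz
          rintro ⟨hc, hy⟩
          have := ih1 (by simp [hc])
          rw [hh] at this
          simp [hy] at this

theorem chain_reverse (m : List Char) (h : m.IsChain PnoDD) : m.reverse.IsChain PnoDD := by
  rw [List.isChain_reverse]
  exact h.imp (fun {a b} hab ⟨x, y⟩ => hab ⟨y, x⟩)

theorem chain_tailDot (m : List Char) (h : m.IsChain PnoDD) : (tailDot m).IsChain PnoDD := by
  unfold tailDot
  split
  · exact h.tail
  · exact h

theorem dropDot_eq_reverse (m : List Char) : dropDot m = (tailDot m.reverse).reverse := by
  unfold tailDot dropDot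
  rw [List.head?_reverse]
  split <;> simp [List.tail_reverse]

theorem chain_dropDot (m : List Char) (h : m.IsChain PnoDD) : (dropDot m).IsChain PnoDD := by
  rw [dropDot_eq_reverse]
  exact chain_reverse _ (chain_tailDot _ (chain_reverse _ h))

theorem dropDot_tailDot_comm (m : List Char) : dropDot (tailDot m) = tailDot (dropDot m) := by
  match m with
  | [] => rfl
  | [a] =>
    unfold tailDot dropDot
    by_cases ha : a = '.' <;> simp [ha]
  | a :: b :: t =>
    unfold tailDot dropDot
    have h1 : (a :: b :: t).getLast? = (b :: t).getLast? := by
      rw [List.getLast?_cons_cons]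
    have h2 : (a :: b :: t).dropLast = a :: (b :: t).dropLast := by
      simp
    by_cases ha : a = '.' <;> by_cases hl : (b :: t).getLast? = some '.' <;>
      simp [ha, hl, h1, h2] <;> cases t <;> simp_all

theorem head_tailDot (x : List Char) (hx : x.IsChain PnoDD) :
    (tailDot x).head? ≠ some '.' := by
  unfold tailDot
  split <;> rename_i hh
  · cases x with
    | nil => simp
    | cons c t =>
      simp only [List.head?_cons, Option.some.injEq] at hh
      cases t with
      | nil => simp
      | cons y ys =>
        rw [List.isChain_cons] at hx
        simp only [List.tail_cons, List.head?_cons, ne_eq, Option.some.injEq]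
        intro hy
        exact (hx.1 y (by simp)) ⟨hh, hy⟩
  · exact hh

theorem ifA_last (x : List Char) :
    (if x ≠ [] ∧ PySem.List.pyGet? x (-1) = some '.' then PySem.List.slice x none (some (-1)) else x)
      = dropDot x := by
  rw [pyGet?_neg_one, slice_neg_one]
  by_cases hl : x.getLast? = some '.'
  · have hne : x ≠ [] := by rintro rfl; simp at hl
    simp [dropDot, hl, hne]
  · simp [dropDot, hl]

theorem ifA_head (x : List Char) :
    (if x ≠ [] ∧ PySem.List.pyGet? x 0 = some '.' then PySem.List.slice x (some 1) none else x)
      = tailDot x := by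
  rw [pyGet?_zero, slice_one]
  by_cases hl : x.head? = some '.'
  · have hne : x ≠ [] := by rintro rfl; simp at hl
    simp [tailDot, hl, hne]
  · simp [tailDot, hl]

theorem pyGetD_last (l : List Char) (a : Char) :
    PySem.List.pyGetD (l ++ [a]) (-1) 'a' = a := by
  simp [PySem.List.pyGetD, PySem.List.pyGet?, PySem.List.pyIdx?]

theorem pad_eq (w : List Char) (hw : w ≠ []) :
    aPad w = w ++ List.replicate (3 - w.length) (PySem.List.pyGetD w (-1) 'a') := by
  match w with
  | [a] =>
    rw [aPad, if_pos (by simp)]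
    rw [show [a] ++ [PySem.List.pyGetD [a] (-1) 'a'] = [a, a] by
      simp [PySem.List.pyGetD, PySem.List.pyGet?, PySem.List.pyIdx?]]
    rw [aPad, if_pos (by simp)]
    rw [show [a, a] ++ [PySem.List.pyGetD [a, a] (-1) 'a'] = [a, a, a] by
      have := pyGetD_last [a] a; simp at this; simp [this]]
    rw [aPad, if_neg (by simp)]
    simp [PySem.List.pyGetD, PySem.List.pyGet?, PySem.List.pyIdx?]
  | [a, b] =>
    rw [aPad, if_pos (by simp)]
    rw [show [a, b] ++ [PySem.List.pyGetD [a, b] (-1) 'a'] = [a, b, b] by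
      have := pyGetD_last [a] b; simp at this; simp [this]]
    rw [aPad, if_neg (by simp)]
    have : PySem.List.pyGetD [a, b] (-1) 'a' = b := by
      have := pyGetD_last [a] b; simpa using this
    simp [this]
  | a :: b :: c :: t =>
    rw [aPad, if_neg (by simp)]
    simp

-- ===== the split/join machinery for B =====

theorem modifyHead_id' (l : List (List Char)) : List.modifyHead (fun x => x) l = l := by
  cases l <;> simp

theorem modifyHead_comp (f g : List Char → List Char) (l : List (List Char)) :
    (l.modifyHead g).modifyHead f = l.modifyHead (fun x => f (g x)) := by
  cases l <;> simp

theorem S_ne_nil (l : List Char) : S l ≠ [] := by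
  cases l with
  | nil => simp [S]
  | cons c t => unfold S; split <;> simp [List.modifyHead_eq_nil_iff, S_ne_nil t]

theorem go_eq (fuel : Nat) : ∀ (l cur : List Char) (acc : List (List Char)), l.length ≤ fuel →
    PySem.Chars.splitOn.go ['.'] fuel l cur acc
      = acc.reverse ++ (S l).modifyHead (cur.reverse ++ ·) := by
  induction fuel with
  | zero =>
    intro l cur acc h
    have : l = [] := by cases l <;> simp_all
    subst this
    simp [PySem.Chars.splitOn.go, S]
  | succ n ih =>
    intro l cur acc h
    cases l with
    | nil => simp [PySem.Chars.splitOn.go, S]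
    | cons c rest =>
      rw [PySem.Chars.splitOn.go]
      by_cases hc : c = '.'
      · subst hc
        rw [if_pos (by simp [List.isPrefixOf])]
        simp only [List.length_cons] at h
        rw [ih _ _ _ (by simpa using h)]
        simp [S, modifyHead_id']
      · rw [if_neg (by simp [List.isPrefixOf, Ne.symm hc])]
        simp only [List.length_cons] at h
        rw [ih _ _ _ (by omega)]
        simp [S, hc]
        cases hS : S rest with
        | nil => exact absurd hS (S_ne_nil rest)
        | cons y ys => simp

theorem splitOn_eq_S (l : List Char) : PySem.Chars.splitOn l ['.'] = S l := by
  unfold PySem.Chars.splitOn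
  rw [go_eq (l.length + 1) l [] [] (by omega)]
  simp [modifyHead_id']

theorem inter_cons (x : List Char) (xs : List (List Char)) :
    List.intercalate ['.'] (x :: xs)
      = x ++ (if xs = [] then [] else '.' :: List.intercalate ['.'] xs) := by
  cases xs <;> simp [List.intercalate, List.intersperse]

theorem dcoll_true_eq (t : List Char) : dcoll true t = tailDot (dcoll false t) := by
  cases t with
  | nil => rfl
  | cons c t' =>
    by_cases hc : c = '.'
    · subst hc
      simp [dcoll, tailDot]
    · simp [dcoll, hc, tailDot]

theorem dropDot_cons (x : Char) (w : List Char) (hw : w ≠ []) :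
    dropDot (x :: w) = x :: dropDot w := by
  obtain ⟨y, ys, rfl⟩ := List.exists_cons_of_ne_nil hw
  unfold dropDot
  rw [List.getLast?_cons_cons]
  split <;> simp

theorem dropDot_ne_nil (v : List Char) (hne : v ≠ []) (hh : v.head? ≠ some '.') :
    dropDot v ≠ [] := by
  obtain ⟨c, t, rfl⟩ := List.exists_cons_of_ne_nil hne
  simp only [List.head?_cons, ne_eq, Option.some.injEq] at hh
  unfold dropDot
  split <;> rename_i h
  · cases t with
    | nil => simp at h; exact absurd h hh
    | cons y ys => simp
  · simp

theorem head?_dropDot_ne (x : List Char) (hx : x.head? ≠ some '.') :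
    (dropDot x).head? ≠ some '.' := by
  unfold dropDot
  split
  · cases x with
    | nil => simp
    | cons a t =>
      cases t with
      | nil => simp
      | cons b s => simpa using hx
  · exact hx

theorem tailDot_of_headne (v : List Char) (h : v.head? ≠ some '.') : tailDot v = v := by
  simp [tailDot, h]

theorem dcoll_id (v : List Char) : ∀ (d : Bool), v.IsChain PnoDD →
    (d = true → v.head? ≠ some '.') → dcoll d v = v := by
  induction v with
  | nil => intro d _ _; rfl
  | cons c t ih =>
    intro d hch hd
    rw [List.isChain_cons] at hch
    rw [dcoll, if_neg, ih (c == '.') hch.2]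
    · intro hcd
      simp only [beq_iff_eq] at hcd
      intro hth
      cases t with
      | nil => simp at hth
      | cons y ys =>
        simp only [List.head?_cons, Option.some.injEq] at hth
        exact (hch.1 y (by simp)) ⟨hcd, hth⟩
    · intro hcd
      simp only [Bool.and_eq_true, beq_iff_eq] at hcd
      exact (hd hcd.1) (by simp [hcd.2])

theorem canon_cons (t : List Char) : ∀ (c : Char), c ≠ '.' →
    canon (c :: t) = c :: bSeg t := by
  induction t with
  | nil =>
    intro c hc
    simp [canon, dcoll, tailDot, dropDot, bSeg, hc]
  | cons d t' ih =>
    intro c hc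
    by_cases hd : d = '.'
    · subst hd
      have hstep : canon (c :: '.' :: t') = dropDot (c :: '.' :: dcoll true t') := by
        simp [canon, dcoll, hc, tailDot]
      have hw : dcoll true t' = tailDot (dcoll false t') := dcoll_true_eq t'
      have hcanon : canon t' = dropDot (dcoll true t') := by
        rw [canon, hw]
      rw [hstep, bSeg, if_pos rfl]
      cases hwv : dcoll true t' with
      | nil =>
        rw [hcanon, hwv]
        simp [dropDot]
      | cons y ys =>
        have hne : dcoll true t' ≠ [] := by rw [hwv]; simp
        have hhd : (dcoll true t').head? ≠ some '.' := by
          rw [hw]; exact head_tailDot _ (dcoll_spec t' false).2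
        have hcne : canon t' ≠ [] := by
          rw [hcanon]; exact dropDot_ne_nil _ hne hhd
        rw [← hwv, if_neg hcne, dropDot_cons _ _ (by simp), dropDot_cons _ _ hne, hcanon]
    · have hdb : (d == '.') = false := by simp [hd]
      have h1 : canon (c :: d :: t') = dropDot (c :: d :: dcoll false t') := by
        simp [canon, dcoll, hc, hdb, tailDot]
      have h2 : canon (d :: t') = dropDot (d :: dcoll false t') := by
        simp [canon, dcoll, hdb, tailDot, hd]
      rw [h1, dropDot_cons _ _ (by simp), ← h2, ih d hd, bSeg, if_neg hd]

theorem J_aux (n : Nat) : ∀ (l : List Char), l.length ≤ n →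
    (List.intercalate ['.'] ((S l).filter (· ≠ [])) = canon l) ∧
    (∀ (p : List Char), p ≠ [] →
      List.intercalate ['.'] (((S l).modifyHead (p ++ ·)).filter (· ≠ [])) = p ++ bSeg l) := by
  induction n with
  | zero =>
    intro l h
    have : l = [] := by cases l <;> simp_all
    subst this
    constructor
    · simp [S, canon, dcoll, tailDot, dropDot, List.intercalate]
    · intro p hp
      simp [S, bSeg]
      rw [List.filter_cons_of_pos (by simpa using hp), inter_cons]
      simp
  | succ n ih =>
    intro l h
    cases l with
    | nil =>
      constructor
      · simp [S, canon, dcoll, tailDot, dropDot, List.intercalate]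
      · intro p hp
        simp [S, bSeg]
        rw [List.filter_cons_of_pos (by simpa using hp), inter_cons]
        simp
    | cons c t =>
      simp only [List.length_cons] at h
      have ht : t.length ≤ n := by omega
      by_cases hc : c = '.'
      · subst hc
        have hmain : ∀ (p : List Char), p ≠ [] →
            List.intercalate ['.'] (((S ('.' :: t)).modifyHead (p ++ ·)).filter (· ≠ []))
              = p ++ bSeg ('.' :: t) := by
          intro p hp
          rw [show S ('.' :: t) = [] :: S t by simp [S]]
          simp only [List.modifyHead_cons, List.append_nil]
          rw [List.filter_cons_of_pos (by simpa using hp), inter_cons, bSeg, if_pos rfl]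
          cases hrest : (S t).filter (· ≠ []) with
          | nil =>
            have hJ : canon t = [] := by
              rw [← (ih t ht).1, hrest]
              simp [List.intercalate]
            rw [if_pos rfl, hJ, if_pos rfl]
          | cons y ys =>
            have hy : y ≠ [] := by
              have : y ∈ (S t).filter (· ≠ []) := by rw [hrest]; simp
              simpa using (List.of_mem_filter this)
            have hJne : canon t ≠ [] := by
              rw [← (ih t ht).1, hrest, inter_cons]
              simp [hy]
            rw [if_neg (by simp), if_neg hJne, ← hrest, (ih t ht).1]
        constructor
        · rw [show S ('.' :: t) = [] :: S t by simp [S]]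
          rw [List.filter_cons_of_neg (by simp)]
          rw [show canon ('.' :: t) = dropDot (dcoll true t) by
            simp [canon, dcoll, tailDot]]
          rw [(ih t ht).1, canon, ← dcoll_true_eq]
        · exact hmain
      · have hS : S (c :: t) = (S t).modifyHead (c :: ·) := by simp [S, hc]
        have hc1 : ∀ (p : List Char), p ≠ [] →
            List.intercalate ['.'] (((S (c :: t)).modifyHead (p ++ ·)).filter (· ≠ []))
              = p ++ bSeg (c :: t) := by
          intro p hp
          rw [hS, modifyHead_comp]
          have : (fun x => p ++ (c :: x)) = (fun x => (p ++ [c]) ++ x) := by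
            funext x; simp
          rw [this, (ih t ht).2 (p ++ [c]) (by simp), bSeg, if_neg hc]
          simp
        constructor
        · rw [canon_cons t c hc, hS]
          have : (S t).modifyHead (c :: ·) = (S t).modifyHead ([c] ++ ·) := by
            simp
          rw [this, (ih t ht).2 [c] (by simp)]
          simp
        · exact hc1

theorem J_eq (l : List Char) :
    List.intercalate ['.'] ((S l).filter (· ≠ [])) = canon l :=
  (J_aux l.length l le_rfl).1

theorem chain_take : ∀ (n : Nat) (l : List Char), l.IsChain PnoDD →
    (l.take n).IsChain PnoDD := by
  intro n l
  induction l generalizing n with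
  | nil => intro _; simp
  | cons c t ih =>
    intro h
    cases n with
    | zero => simp
    | succ m =>
      rw [List.isChain_cons] at h
      rw [List.take_succ_cons, List.isChain_cons]
      refine ⟨?_, ih m h.2⟩
      intro z hz
      apply h.1 z
      cases t with
      | nil => simp at hz
      | cons y ys =>
        cases m with
        | zero => simp at hz
        | succ k => simpa using hz

theorem head?_take15 (l : List Char) : (l.take 15).head? = l.head? := by
  cases l <;> simp

theorem take15_ne_nil (l : List Char) (h : l ≠ []) : l.take 15 ≠ [] := by
  cases l <;> simp_all

-- ===== VERDICT (by name: the statement is the Claim_ definition above) =====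
theorem solution_spec : Claim_equal_solution := by
  intro new_id _
  unfold Spec_solution solution solution_alt
  simp only [keep_eq]
  set L := PySem.Chars.lower new_id.toList with hL
  set F := L.filter keepA with hF
  set m := dcoll false F with hm
  have hchain : m.IsChain PnoDD := (dcoll_spec _ false).2
  have hA : L.foldl aStep [] = m := by
    rw [foldl_aStep, gA_eq_dcoll]
    rfl
  have hB : PySem.Chars.join ['.'] ((PySem.Chars.splitOn F ['.']).filter (· ≠ [])) = canon F := by
    rw [splitOn_eq_S]
    exact J_eq F
  rw [hA, hB, ifA_last m, ifA_head (dropDot m)]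
  have hcanon : canon F = tailDot (dropDot m) := by
    rw [canon, ← hm, dropDot_tailDot_comm]
  rw [hcanon]
  set u := (if tailDot (dropDot m) = [] then tailDot (dropDot m) ++ ['a'] else tailDot (dropDot m))
    with hu
  have hu' : (if tailDot (dropDot m) = [] then ['a'] else tailDot (dropDot m)) = u := by
    rw [hu]; split <;> simp_all
  rw [hu']
  have hune : u ≠ [] := by
    rw [hu]; split <;> simp_all
  have huchain : u.IsChain PnoDD := by
    rw [hu]; split
    · simp_all
    · rw [← dropDot_tailDot_comm]
      exact chain_dropDot _ (chain_tailDot _ hchain)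
  have huhead : u.head? ≠ some '.' := by
    rw [hu]; split
    · simp_all
    · rw [← dropDot_tailDot_comm]
      exact head?_dropDot_ne _ (head_tailDot _ hchain)
  rw [PySem.Chars.slice_eq_listSlice, slice_fifteen u]
  set v := u.take 15 with hv
  rw [ifA_last v]
  have hvchain : v.IsChain PnoDD := chain_take 15 u huchain
  have hvhead : v.head? ≠ some '.' := by rw [hv, head?_take15]; exact huhead
  have hvne : v ≠ [] := take15_ne_nil u hune
  have hBhead : PySem.Chars.join ['.'] ((PySem.Chars.splitOn v ['.']).filter (· ≠ []))
      = dropDot v := by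
    rw [splitOn_eq_S]
    have h := J_eq v
    unfold canon at h
    rw [dcoll_id v false hvchain (by simp), tailDot_of_headne v hvhead] at h
    exact h
  rw [hBhead]
  exact congrArg String.ofList (pad_eq _ (dropDot_ne_nil v hvne hvhead))
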